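-- pv_equiv track=rewrite | github.com/maartenp/puuzel | tools/filter_wordlist.py | compute_grid_length
-- ===== SOURCE A (Python) =====
-- def normalize_word(word: str) -> str:
--     """
--     Uppercase the word and normalize Unicode IJ ligatures.
--
--     Replaces:
--     - U+0132 (LATIN CAPITAL LIGATURE IJ) → "IJ"
--     - U+0133 (LATIN SMALL LIGATURE IJ) → "ij"
--
--     Then converts to uppercase.
--     """
--     # Normalize IJ ligatures before uppercasing
--     word = word.replace("\u0132", "IJ").replace("\u0133", "ij")
--     return word.upper()
--
-- def compute_grid_length(word: str) -> int:
--     """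
--     Compute the number of grid cells a word occupies.
--
--     In Dutch crosswords, "IJ" is a digraph that occupies a single cell.
--     This function counts tokens: "IJ" = 1 token, all other characters = 1 token.
--
--     Examples:
--         compute_grid_length("IJSBEER") == 6  (IJ-S-B-E-E-R)
--         compute_grid_length("IJ") == 1
--         compute_grid_length("LIJST") == 4  (L-IJ-S-T)
--         compute_grid_length("HUIS") == 4
--     """
--     normalized = normalize_word(word)
--     count = 0
--     i = 0
--     while i < len(normalized):
--         if normalized[i:i+2] == "IJ":
--             count += 1
--             i += 2
--         else:
--             count += 1
--             i += 1
--     return count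
-- ===== SOURCE B (Python) =====
-- def normalize_word(word: str) -> str:
--     word = word.replace("\u0132", "IJ").replace("\u0133", "ij")
--     return word.upper()
--
--
-- def compute_grid_length(word: str) -> int:
--     # Closed form: each non-overlapping "IJ" digraph merges two characters
--     # into one cell, so cells = total length minus number of digraphs.
--     normalized = normalize_word(word)
--     return len(normalized) - normalized.count("IJ")
-- ===== Notes on version B (the rewrite author's own statement) =====
-- stated objective: faster
-- what changed: Replaced the explicit per-character while-loop index walk with a closed form: length of the normalized word minus the number of non-overlapping occurrences of the Dutch digraph (exact because the digraph cannot overlap itself), computed by str.count.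
import Mathlib
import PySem

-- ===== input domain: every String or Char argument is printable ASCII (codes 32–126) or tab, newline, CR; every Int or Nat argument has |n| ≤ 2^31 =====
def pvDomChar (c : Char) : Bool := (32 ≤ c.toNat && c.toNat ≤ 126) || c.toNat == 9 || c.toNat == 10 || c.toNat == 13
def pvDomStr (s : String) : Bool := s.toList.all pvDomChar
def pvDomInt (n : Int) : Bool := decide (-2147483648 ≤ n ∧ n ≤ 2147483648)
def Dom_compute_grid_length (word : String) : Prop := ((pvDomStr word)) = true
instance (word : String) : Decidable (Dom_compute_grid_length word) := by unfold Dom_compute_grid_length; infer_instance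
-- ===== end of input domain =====

-- B replaces A's while-loop scan by the closed form len(normalized) - normalized.count of the digraph (measured faster: C-level count vs a Python loop).

-- ===== PORT A =====
-- helper normalize_word (shared by both Pythons)
def normalize_word (word : String) : String :=
  PySem.Str.upper (PySem.Str.replace (PySem.Str.replace word "\u0132" "IJ") "\u0133" "ij")

-- the while loop of A, on the suffix of the normalized word starting at index i:
-- normalized[i:i+2] is the [0:2] slice of the current suffix
def aLoop : List Char → Int
  | [] => 0
  | c :: rest =>
    if PySem.List.slice (c :: rest) (some 0) (some 2) = ['I', 'J'] then
      1 + aLoop rest.tail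
    else
      1 + aLoop rest
termination_by l => l.length
decreasing_by
  all_goals (simp [List.length_tail]; try omega)

def compute_grid_length (word : String) : Int :=
  aLoop (normalize_word word).toList

-- ===== PORT B =====
def compute_grid_length_alt (word : String) : Int :=
  PySem.Str.len (normalize_word word) - ((PySem.Str.count (normalize_word word) "IJ" : Int))

-- ===== PRECONDITION & SPEC =====
def Spec_compute_grid_length (word : String) (out : Int) : Prop := out = compute_grid_length_alt word
instance (word : String) (out : Int) : Decidable (Spec_compute_grid_length word out) := by unfold Spec_compute_grid_length; infer_instance

-- ===== CLAIM (what is proved, stated in full; the proofs are below) =====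
def Claim_equal_compute_grid_length : Prop := ∀ (word : String), Dom_compute_grid_length word → Spec_compute_grid_length word (compute_grid_length word)

-- ===== LEMMAS AND PROOFS =====

theorem go_nil (fuel acc : Nat) : PySem.Chars.count.go ['I','J'] fuel [] acc = acc := by
  cases fuel <;> simp [PySem.Chars.count.go]

theorem go_cons_cons (fuel acc : Nat) (c1 c2 : Char) (rest : List Char) :
    PySem.Chars.count.go ['I','J'] (fuel+1) (c1::c2::rest) acc =
      (if ['I','J'].isPrefixOf (c1::c2::rest) then PySem.Chars.count.go ['I','J'] fuel rest (acc+1)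
       else PySem.Chars.count.go ['I','J'] fuel (c2::rest) acc) := by
  simp [PySem.Chars.count.go]

theorem go_single (fuel acc : Nat) (c : Char) :
    PySem.Chars.count.go ['I','J'] (fuel+1) [c] acc = acc := by
  simp [PySem.Chars.count.go, List.isPrefixOf, go_nil]

theorem aLoop_slice_cons_cons (c1 c2 : Char) (rest : List Char) :
    PySem.List.slice (c1::c2::rest) (some 0) (some 2) = [c1, c2] := by
  rw [PySem.List.slice_toNat _ (by norm_num) (by norm_num)]
  simp

-- loop invariant: the scan count plus the number of remaining IJ digraphs is the length
theorem key : ∀ (n : Nat) (l : List Char) (fuel acc : Nat), l.length ≤ n → l.length ≤ fuel →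
    aLoop l + ((PySem.Chars.count.go ['I','J'] fuel l acc : Nat) : Int) = acc + l.length := by
  intro n
  induction n with
  | zero =>
    intro l fuel acc hn _
    have : l = [] := List.eq_nil_of_length_eq_zero (Nat.le_zero.mp hn)
    subst this
    simp [aLoop, go_nil]
  | succ n ih =>
    intro l fuel acc hn hf
    match l, fuel with
    | [], _ => simp [aLoop, go_nil]
    | c :: rest, fuel + 1 =>
      match rest with
      | [] =>
        have hslice : PySem.List.slice [c] (some 0) (some 2) = [c] := by
          rw [PySem.List.slice_toNat _ (by norm_num) (by norm_num)]; simp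
        simp [aLoop, hslice, go_single]
        omega
      | c2 :: rest2 =>
        simp only [List.length_cons] at hn hf
        rw [go_cons_cons]
        by_cases h : c = 'I' ∧ c2 = 'J'
        · obtain ⟨h1, h2⟩ := h
          subst h1; subst h2
          have hpre : (['I','J'].isPrefixOf ('I'::'J'::rest2)) = true := by
            simp [List.isPrefixOf]
          rw [if_pos hpre]
          have hloop : aLoop ('I'::'J'::rest2) = 1 + aLoop rest2 := by
            rw [aLoop]
            rw [if_pos (aLoop_slice_cons_cons 'I' 'J' rest2)]
            simp
          rw [hloop]
          have := ih rest2 fuel (acc+1) (by omega) (by omega)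
          simp only [List.length_cons] at this ⊢
          push_cast at this ⊢
          omega
        · have hne : ('I'::'J'::([] : List Char)) ≠ (c::c2::([] : List Char)) := by
            intro hcontra
            apply h
            injection hcontra with e1 e2
            injection e2 with e2 _
            exact ⟨e1.symm, e2.symm⟩
          have hpre : (['I','J'].isPrefixOf (c::c2::rest2)) = false := by
            simp only [List.isPrefixOf, Bool.and_eq_false_iff]
            by_cases hc : c = 'I'
            · right; subst hc
              by_cases hc2 : c2 = 'J'
              · exact absurd ⟨rfl, hc2⟩ h
              · left
                simp only [beq_eq_false_iff_ne, ne_eq]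
                exact fun e => hc2 e.symm
            · left; simp only [beq_eq_false_iff_ne, ne_eq]
              exact fun e => hc e.symm
          rw [if_neg (by simp [hpre])]
          have hloop : aLoop (c::c2::rest2) = 1 + aLoop (c2::rest2) := by
            rw [aLoop]
            rw [if_neg (by rw [aLoop_slice_cons_cons]; intro hcontra; exact hne (by
              injection hcontra with e1 e2; injection e2 with e2 _; simp [e1, e2]))]
          rw [hloop]
          have := ih (c2::rest2) fuel acc (by simpa using hn) (by simpa using hf)
          simp only [List.length_cons] at this ⊢
          push_cast at this ⊢
          omega

theorem aLoop_eq (l : List Char) :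
    aLoop l = (l.length : Int) - (PySem.Chars.count l ['I','J'] : Int) := by
  have hcount : PySem.Chars.count l ['I','J'] = PySem.Chars.count.go ['I','J'] l.length l 0 := by
    simp [PySem.Chars.count]
  have := key l.length l l.length 0 le_rfl le_rfl
  rw [hcount]
  omega

-- ===== VERDICT (by name: the statement is the Claim_ definition above) =====
theorem compute_grid_length_spec : Claim_equal_compute_grid_length := by
  intro word _
  unfold Spec_compute_grid_length compute_grid_length compute_grid_length_alt
  rw [aLoop_eq, PySem.Str.len_eq, PySem.Str.count_eq]
  have hIJ : "IJ".toList = ['I','J'] := by decide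
  rw [hIJ]
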